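-- pv_equiv track=rewrite | github.com/masakiaota/kyoupuro | practice/algorithm_datastructure_for_programming_contest/136_ALDS1_4_D.py | n_nimotu_if_P
-- ===== SOURCE A (Python) =====
-- def n_nimotu_if_P(P, k, arr):  # Pに対する単調増加関数
--     weight = 0
--     n_trucks = 1  # 1台目から積んでいく
--     for i, a in enumerate(arr):
--         # iの荷物について積むかどうか決め、それに応じてトラックの数を増加させる
--         if P < a:  # P<aの時点で即時終了 絶対その荷物は積めないので
--             return i  # i個の荷物が詰める(i-1番目までの荷物が積める)
--
--         if weight + a <= P:  # Pを超える手前までどんどん積んでいく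
--             weight += a
--         else:
--             n_trucks += 1  # Pを超えるなら次のtruckを用意
--             weight = a  # 新たなトラックに積んでいる
--
--         if n_trucks == k+1:  # k+1台目のtruckは存在しない。これまでに積んだ荷物の数を返す
--             return i  # (i-1番目までのi個の荷物が積める)
--
--     # truckに余裕があるなら全部詰める
--     return len(arr)  # すべて運べるならlen(arr)を返すとする。
-- ===== SOURCE B (Python) =====
-- def n_nimotu_if_P(P, k, arr):
--     j = 0
--     n = len(arr)
--     for _ in range(k):
--         if j == n:
--             break
--         cap = P
--         while j < n:
--             a = arr[j]
--             if P < a: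
--                 return j
--             if cap < a:
--                 break
--             cap -= a
--             j += 1
--     return j
-- ===== Notes on version B (the rewrite author's own statement) =====
-- stated objective: alternative
-- what changed: Replaces A's flat single pass carrying a weight accumulator and a truck counter by a nested traversal that packs one truck at a time: an outer loop over the k trucks, each with its own remaining capacity, and an inner loop advancing an item pointer.
-- outside the precondition, e.g. on n_nimotu_if_P(10, -1, [1]): A returns 1, B returns 0
import Mathlib
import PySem

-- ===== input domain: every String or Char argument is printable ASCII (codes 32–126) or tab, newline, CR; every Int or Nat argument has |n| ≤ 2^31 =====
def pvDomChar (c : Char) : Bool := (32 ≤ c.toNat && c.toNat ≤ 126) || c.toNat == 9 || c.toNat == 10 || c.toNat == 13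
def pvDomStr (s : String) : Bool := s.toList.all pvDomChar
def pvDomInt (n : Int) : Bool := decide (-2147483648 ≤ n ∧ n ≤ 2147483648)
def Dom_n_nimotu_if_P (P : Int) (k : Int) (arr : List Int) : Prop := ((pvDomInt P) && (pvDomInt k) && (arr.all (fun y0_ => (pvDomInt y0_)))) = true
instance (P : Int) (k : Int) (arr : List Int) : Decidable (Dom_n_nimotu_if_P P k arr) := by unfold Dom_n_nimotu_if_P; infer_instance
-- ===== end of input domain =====

-- B packs truck by truck (outer loop over trucks, inner pointer over items) instead of
-- A's single pass with a weight accumulator and truck counter; same values on k ≥ 0.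

-- ===== PORT A =====
-- A's for-loop over enumerate(arr): state (i, weight, n_trucks); early returns become values.
def nNimotuGoA (P : Int) (k : Int) : List Int → Int → Int → Int → Int
  | [], i, _, _ => i                         -- loop ends: i = len(arr)
  | a :: rest, i, weight, nTrucks =>
    if P < a then i
    else
      let st := if weight + a ≤ P then (weight + a, nTrucks) else (a, nTrucks + 1)
      if st.2 = k + 1 then i
      else nNimotuGoA P k rest (i + 1) st.1 st.2

def n_nimotu_if_P (P : Int) (k : Int) (arr : List Int) : Int :=
  nNimotuGoA P k arr 0 0 1

-- ===== PORT B =====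
-- B's inner while over the remaining items (suffix) with pointer j and cap:
-- .inl j = "return j" (item exceeds P); .inr (j, suffix) = break / exhausted.
def nNimotuInnerB (P : Int) : List Int → Int → Int → Sum Int (Int × List Int)
  | [], j, _ => .inr (j, [])
  | a :: rest, j, cap =>
    if P < a then .inl j
    else if cap < a then .inr (j, a :: rest)
    else nNimotuInnerB P rest (j + 1) (cap - a)

-- B's outer for-loop over range(k): fuel = trucks left; "if j == n: break" = empty suffix.
def nNimotuOuterB (P : Int) : Nat → List Int → Int → Int
  | 0, _, j => j
  | _ + 1, [], j => j
  | t + 1, a :: rest, j =>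
    match nNimotuInnerB P (a :: rest) j P with
    | .inl r => r
    | .inr (j', suf') => nNimotuOuterB P t suf' j'

def n_nimotu_if_P_alt (P : Int) (k : Int) (arr : List Int) : Int :=
  nNimotuOuterB P k.toNat arr 0

-- ===== PRECONDITION & SPEC =====
-- Pre_ restricts to the natural domain k ≥ 0 (a nonnegative number of trucks); for k < 0
-- A behaves as if trucks were unlimited (an accident of its counter check), B packs nothing.
def Pre_n_nimotu_if_P (P : Int) (k : Int) (arr : List Int) : Prop := 0 ≤ k
instance (P : Int) (k : Int) (arr : List Int) : Decidable (Pre_n_nimotu_if_P P k arr) := by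
  unfold Pre_n_nimotu_if_P; infer_instance

def pvWitness_n_nimotu_if_P : Int × Int × List Int := (10, 2, [4, 5, 3, 2, 8])

def Spec_n_nimotu_if_P (P : Int) (k : Int) (arr : List Int) (out : Int) : Prop :=
  out = n_nimotu_if_P_alt P k arr
instance (P : Int) (k : Int) (arr : List Int) (out : Int) : Decidable (Spec_n_nimotu_if_P P k arr out) := by
  unfold Spec_n_nimotu_if_P; infer_instance

-- ===== CLAIM (what is proved, stated in full; the proofs are below) =====
def Claim_equal_n_nimotu_if_P : Prop := ∀ (P : Int) (k : Int) (arr : List Int), Dom_n_nimotu_if_P P k arr → Pre_n_nimotu_if_P P k arr → Spec_n_nimotu_if_P P k arr (n_nimotu_if_P P k arr)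

-- ===== LEMMAS AND PROOFS =====

-- B continued from a mid-truck state: cap = P - w on the current truck, k - t trucks still unused.
def nNimotuMidB (P : Int) (k : Int) (suf : List Int) (j : Int) (w : Int) (t : Int) : Int :=
  match nNimotuInnerB P suf j (P - w) with
  | .inl r => r
  | .inr (j', suf') => nNimotuOuterB P (k - t).toNat suf' j'

theorem outerB_nil (P : Int) (f : Nat) (j : Int) : nNimotuOuterB P f [] j = j := by
  cases f <;> simp [nNimotuOuterB]

-- Invariant: A from state (j, w, t) equals B from the corresponding mid-truck state, for 1 ≤ t ≤ k.
theorem mid_inv (P k : Int) (suf : List Int) :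
    ∀ (j w t : Int), 1 ≤ t → t ≤ k →
      nNimotuGoA P k suf j w t = nNimotuMidB P k suf j w t := by
  induction suf with
  | nil =>
    intro j w t _ _
    simp [nNimotuGoA, nNimotuMidB, nNimotuInnerB, outerB_nil]
  | cons a rest ih =>
    intro j w t ht1 htk
    by_cases hPa : P < a
    · simp [nNimotuGoA, nNimotuMidB, nNimotuInnerB, hPa]
    · by_cases hfit : w + a ≤ P
      · -- item fits the current truck on both sides
        have hcap : ¬ (P - w < a) := by omega
        have hne : ¬ (t = k + 1) := by omega
        rw [show nNimotuGoA P k (a :: rest) j w t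
              = nNimotuGoA P k rest (j + 1) (w + a) t by
            simp [nNimotuGoA, hPa, hfit, hne]]
        rw [ih (j + 1) (w + a) t ht1 htk]
        simp [nNimotuMidB, nNimotuInnerB, hPa, hcap]
        rw [show P - w - a = P - (w + a) by ring]
      · -- new truck needed
        have hcap : P - w < a := by omega
        by_cases hlast : t = k
        · -- no truck left
          have : t + 1 = k + 1 := by omega
          simp [nNimotuGoA, nNimotuMidB, nNimotuInnerB, nNimotuOuterB, hPa, hfit, hcap, this, hlast]
        · -- open the next truck; it packs a (a ≤ P)
          have hne : ¬ (t + 1 = k + 1) := by omega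
          rw [show nNimotuGoA P k (a :: rest) j w t
                = nNimotuGoA P k rest (j + 1) a (t + 1) by
              simp [nNimotuGoA, hPa, hfit, hne]]
          rw [ih (j + 1) a (t + 1) (by omega) (by omega)]
          have hfuel : (k - t).toNat = (k - (t + 1)).toNat + 1 := by omega
          simp only [nNimotuMidB, nNimotuInnerB, if_neg hPa, if_pos hcap, hfuel]
          simp [nNimotuOuterB, nNimotuInnerB, hPa]

-- ===== VERDICT (by name: the statement is the Claim_ definition above) =====
theorem n_nimotu_if_P_spec : Claim_equal_n_nimotu_if_P := by
  intro P k arr _ hk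
  have hk' : 0 ≤ k := hk
  unfold Spec_n_nimotu_if_P n_nimotu_if_P n_nimotu_if_P_alt
  rcases lt_or_ge k 1 with hk0 | hk1
  · -- k = 0: A returns the index of the first item (or 0/len for empty arr), B runs no trucks
    have hk0' : k = 0 := by omega
    subst hk0'
    cases arr with
    | nil => simp [nNimotuGoA, nNimotuOuterB]
    | cons a rest =>
      by_cases hPa : P < a
      · simp [nNimotuGoA, nNimotuOuterB, hPa]
      · have ha : a ≤ P := by omega
        simp [nNimotuGoA, nNimotuOuterB, hPa, ha]
  · -- k ≥ 1: unfold B's first truck and apply the invariant at state (0, 0, 1)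
    have h := mid_inv P k arr 0 0 1 (by omega) hk1
    rw [h]
    cases arr with
    | nil => simp [nNimotuMidB, nNimotuInnerB, outerB_nil]
    | cons a rest =>
      have hfuel : k.toNat = (k - 1).toNat + 1 := by omega
      rw [hfuel]
      by_cases hPa : P < a
      · simp [nNimotuMidB, nNimotuInnerB, nNimotuOuterB, hPa]
      · simp [nNimotuMidB, nNimotuInnerB, nNimotuOuterB, hPa]
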